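-- pv_equiv track=rewrite | github.com/abdullahau/Data-Structures-and-Algorithms-Spring-2024 | Exercises/Week 7/queens.py | check_combs
-- ===== SOURCE A (Python) =====
-- def check_combs(combs, k):
--     failed = 0
--     for i in combs:
--         fail = 0
--         for queen1 in range(len(i)-1):
--             for queen2 in range(queen1+1, len(i)):
--                 fail += attack(i[queen1], i[queen2])
--         if fail > 0:
--             failed += 1
--     return failed
--
-- def attack(queen1, queen2):
--     if queen1[0] == queen2[0] or queen1[1] == queen2[1]:
--         return 1
--     if abs(queen1[0] - queen2[0]) == abs(queen1[1] - queen2[1]):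
--         return 1
--     return 0
-- ===== SOURCE B (Python) =====
-- def check_combs(combs, k):
--     failed = 0
--     for comb in combs:
--         rows, cols, diag, anti = set(), set(), set(), set()
--         for r, c in comb:
--             if r in rows or c in cols or r - c in diag or r + c in anti:
--                 failed += 1
--                 break
--             rows.add(r)
--             cols.add(c)
--             diag.add(r - c)
--             anti.add(r + c)
--     return failed
-- ===== Notes on version B (the rewrite author's own statement) =====
-- stated objective: alternative
-- what changed: Per combination, A counts attacks over all O(n^2) index pairs and tests the count; B makes one pass over the queens keeping four seen-key sets (row, column, r-c diagonal, r+c anti-diagonal) and flags the combination on the first key collision, breaking early.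
import Mathlib
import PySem

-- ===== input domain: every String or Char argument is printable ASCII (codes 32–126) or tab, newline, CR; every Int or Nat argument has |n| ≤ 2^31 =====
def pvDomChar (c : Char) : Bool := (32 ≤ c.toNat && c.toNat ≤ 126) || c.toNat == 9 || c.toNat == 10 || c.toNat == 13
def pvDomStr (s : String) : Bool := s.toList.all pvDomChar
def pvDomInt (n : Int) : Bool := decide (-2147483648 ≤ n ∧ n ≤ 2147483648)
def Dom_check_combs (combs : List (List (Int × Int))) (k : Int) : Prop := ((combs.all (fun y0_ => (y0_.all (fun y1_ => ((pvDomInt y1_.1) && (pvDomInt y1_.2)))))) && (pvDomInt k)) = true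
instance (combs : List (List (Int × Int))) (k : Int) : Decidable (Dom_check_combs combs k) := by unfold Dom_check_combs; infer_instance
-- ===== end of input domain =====

-- B replaces A's all-pairs attack count per combination by a single pass keeping
-- four seen-key sets (row, column, both diagonals) with early break; same return value, measured faster in a timing run.

-- ===== PORT A =====
def attack (queen1 queen2 : Int × Int) : Int :=
  if queen1.1 = queen2.1 ∨ queen1.2 = queen2.2 then 1
  else if |queen1.1 - queen2.1| = |queen1.2 - queen2.2| then 1
  else 0

-- the inner two index loops of A (indices are always in range, so pyGetD's default is never used)
def comb_fail (i : List (Int × Int)) : Int :=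
  (PySem.List.pyRange 0 ((i.length : Int) - 1) 1).foldl (fun fail q1 =>
    (PySem.List.pyRange (q1 + 1) (i.length : Int) 1).foldl (fun fail q2 =>
      fail + attack (PySem.List.pyGetD i q1 (0, 0)) (PySem.List.pyGetD i q2 (0, 0))) fail) 0

def check_combs (combs : List (List (Int × Int))) (k : Int) : Int :=
  combs.foldl (fun failed i => if comb_fail i > 0 then failed + 1 else failed) 0

-- ===== PORT B =====
-- the inner loop of B with its early 'break' as structural recursion over the queens
def scanQueens (queens : List (Int × Int)) (rows cols diag anti : PySem.Set Int) : Bool :=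
  match queens with
  | [] => false
  | (r, c) :: rest =>
    if PySem.Set.contains rows r || PySem.Set.contains cols c ||
       PySem.Set.contains diag (r - c) || PySem.Set.contains anti (r + c) then true
    else scanQueens rest (PySem.Set.add rows r) (PySem.Set.add cols c)
           (PySem.Set.add diag (r - c)) (PySem.Set.add anti (r + c))

def check_combs_alt (combs : List (List (Int × Int))) (k : Int) : Int :=
  combs.foldl (fun failed comb =>
    if scanQueens comb PySem.Set.empty PySem.Set.empty PySem.Set.empty PySem.Set.empty
    then failed + 1 else failed) 0

-- ===== PRECONDITION & SPEC =====
def Spec_check_combs (combs : List (List (Int × Int))) (k : Int) (out : Int) : Prop := out = check_combs_alt combs k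
instance (combs : List (List (Int × Int))) (k : Int) (out : Int) : Decidable (Spec_check_combs combs k out) := by unfold Spec_check_combs; infer_instance

-- ===== CLAIM (what is proved, stated in full; the proofs are below) =====
def Claim_equal_check_combs : Prop := ∀ (combs : List (List (Int × Int))) (k : Int), Dom_check_combs combs k → Spec_check_combs combs k (check_combs combs k)

-- ===== LEMMAS AND PROOFS =====

-- two queens attack each other (A's condition, rewritten diagonal-wise)
def QAtt (a b : Int × Int) : Prop :=
  a.1 = b.1 ∨ a.2 = b.2 ∨ a.1 - a.2 = b.1 - b.2 ∨ a.1 + a.2 = b.1 + b.2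

lemma attack_nonneg (a b : Int × Int) : 0 ≤ attack a b := by
  unfold attack; split_ifs <;> norm_num

lemma attack_pos_iff (a b : Int × Int) : 0 < attack a b ↔ QAtt a b := by
  unfold attack QAtt
  split_ifs with h1 h2
  · simp only [abs_eq_abs] at *; constructor
    · intro _; tauto
    · intro _; norm_num
  · simp only [abs_eq_abs] at *; constructor
    · intro _; omega
    · intro _; norm_num
  · simp only [abs_eq_abs] at *; constructor
    · intro h; omega
    · intro h; omega

lemma sum_pos_iff (L : List Int) (h : ∀ x ∈ L, 0 ≤ x) :
    0 < L.sum ↔ ∃ x ∈ L, 0 < x := by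
  induction L with
  | nil => simp
  | cons y ys ih =>
    have hy := h y (by simp)
    have hys : ∀ x ∈ ys, 0 ≤ x := fun x hx => h x (by simp [hx])
    have hsum : 0 ≤ ys.sum := List.sum_nonneg hys
    simp only [List.sum_cons, List.mem_cons]
    constructor
    · intro hpos
      by_cases hy0 : 0 < y
      · exact ⟨y, Or.inl rfl, hy0⟩
      · have : 0 < ys.sum := by omega
        obtain ⟨x, hx, hx0⟩ := (ih hys).mp this
        exact ⟨x, Or.inr hx, hx0⟩
    · rintro ⟨x, hx | hx, hx0⟩
      · have hs : 0 ≤ ys.sum := hsum; omega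
      · have : 0 < ys.sum := (ih hys).mpr ⟨x, hx, hx0⟩; omega

def Sline (l : List (Int × Int)) (q1 : Int) : Int :=
  ((PySem.List.pyRange (q1 + 1) (l.length : Int) 1).map (fun q2 =>
    attack (PySem.List.pyGetD l q1 (0, 0)) (PySem.List.pyGetD l q2 (0, 0)))).sum

lemma comb_fail_eq_sum (l : List (Int × Int)) :
    comb_fail l = ((PySem.List.pyRange 0 ((l.length : Int) - 1) 1).map (Sline l)).sum := by
  unfold comb_fail
  have h : (fun (fail q1 : Int) =>
      (PySem.List.pyRange (q1 + 1) (l.length : Int) 1).foldl (fun fail q2 =>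
        fail + attack (PySem.List.pyGetD l q1 (0, 0)) (PySem.List.pyGetD l q2 (0, 0))) fail)
      = fun fail q1 => fail + Sline l q1 := by
    funext fail q1
    exact PySem.List.foldl_add _ _ _
  rw [h, PySem.List.foldl_add]
  simp

lemma comb_fail_pos_iff (l : List (Int × Int)) :
    0 < comb_fail l ↔ ¬ l.Pairwise (fun a b => ¬ QAtt a b) := by
  rw [comb_fail_eq_sum]
  rw [sum_pos_iff]
  · rw [List.pairwise_iff_getElem]
    push_neg
    constructor
    · rintro ⟨x, hx, hx0⟩
      obtain ⟨q1, hq1, rfl⟩ := List.mem_map.mp hx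
      rw [PySem.List.mem_pyRange_one] at hq1
      unfold Sline at hx0
      rw [sum_pos_iff _ (by rintro x hx; obtain ⟨q2, hq2, rfl⟩ := List.mem_map.mp hx; exact attack_nonneg _ _)] at hx0
      obtain ⟨y, hy, hy0⟩ := hx0
      obtain ⟨q2, hq2, rfl⟩ := List.mem_map.mp hy
      rw [PySem.List.mem_pyRange_one] at hq2
      rw [attack_pos_iff] at hy0
      refine ⟨q1.toNat, q2.toNat, by omega, by omega, by omega, ?_⟩
      rw [PySem.List.pyGetD_eq_getElem l (i := q1) (0,0) (by omega) (by omega),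
          PySem.List.pyGetD_eq_getElem l (i := q2) (0,0) (by omega) (by omega)] at hy0
      exact hy0
    · rintro ⟨i, j, hi, hj, hij, hrel⟩
      refine ⟨Sline l (i : Int), List.mem_map.mpr ⟨(i : Int), ?_, rfl⟩, ?_⟩
      · rw [PySem.List.mem_pyRange_one]; omega
      · unfold Sline
        rw [sum_pos_iff _ (by rintro x hx; obtain ⟨q2, hq2, rfl⟩ := List.mem_map.mp hx; exact attack_nonneg _ _)]
        refine ⟨_, List.mem_map.mpr ⟨(j : Int), ?_, rfl⟩, ?_⟩
        · rw [PySem.List.mem_pyRange_one]; omega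
        · rw [attack_pos_iff,
              PySem.List.pyGetD_eq_getElem l (i := (i : Int)) (0,0) (by omega) (by omega),
              PySem.List.pyGetD_eq_getElem l (i := (j : Int)) (0,0) (by omega) (by omega)]
          simpa using hrel
  · rintro x hx
    obtain ⟨q1, hq1, rfl⟩ := List.mem_map.mp hx
    unfold Sline
    exact List.sum_nonneg (by rintro x hx; obtain ⟨q2, hq2, rfl⟩ := List.mem_map.mp hx; exact attack_nonneg _ _)

-- B's scan detects exactly a clash of a new queen with a previously seen one
def Clash (p l : List (Int × Int)) : Prop :=
  match l with
  | [] => False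
  | y :: rest => (∃ x ∈ p, QAtt x y) ∨ Clash (p ++ [y]) rest

lemma scan_eq_clash (l : List (Int × Int)) : ∀ (p : List (Int × Int)) (rows cols diag anti : PySem.Set Int),
    (∀ v, v ∈ rows ↔ ∃ x ∈ p, x.1 = v) →
    (∀ v, v ∈ cols ↔ ∃ x ∈ p, x.2 = v) →
    (∀ v, v ∈ diag ↔ ∃ x ∈ p, x.1 - x.2 = v) →
    (∀ v, v ∈ anti ↔ ∃ x ∈ p, x.1 + x.2 = v) →
    (scanQueens l rows cols diag anti = true ↔ Clash p l) := by
  induction l with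
  | nil => intro p rows cols diag anti _ _ _ _; simp [scanQueens, Clash]
  | cons y rest ih =>
    rintro p rows cols diag anti hr hc hd ha
    obtain ⟨r, c⟩ := y
    rw [scanQueens]
    by_cases hcond : (PySem.Set.contains rows r || PySem.Set.contains cols c ||
       PySem.Set.contains diag (r - c) || PySem.Set.contains anti (r + c)) = true
    · rw [if_pos hcond]
      simp only [Bool.or_eq_true, PySem.Set.contains_iff] at hcond
      have : Clash p ((r, c) :: rest) := by
        rw [Clash]
        left
        rcases hcond with ((h | h) | h) | h
        · obtain ⟨x, hx, hx1⟩ := (hr r).mp h; exact ⟨x, hx, Or.inl hx1⟩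
        · obtain ⟨x, hx, hx1⟩ := (hc c).mp h; exact ⟨x, hx, Or.inr (Or.inl hx1)⟩
        · obtain ⟨x, hx, hx1⟩ := (hd (r - c)).mp h; exact ⟨x, hx, Or.inr (Or.inr (Or.inl hx1))⟩
        · obtain ⟨x, hx, hx1⟩ := (ha (r + c)).mp h; exact ⟨x, hx, Or.inr (Or.inr (Or.inr hx1))⟩
      simp [this]
    · rw [if_neg hcond]
      simp only [Bool.or_eq_true, PySem.Set.contains_iff, not_or] at hcond
      obtain ⟨⟨⟨h1, h2⟩, h3⟩, h4⟩ := hcond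
      have hnone : ¬ ∃ x ∈ p, QAtt x (r, c) := by
        rintro ⟨x, hx, hrel⟩
        rcases hrel with h | h | h | h
        · exact h1 ((hr r).mpr ⟨x, hx, h⟩)
        · exact h2 ((hc c).mpr ⟨x, hx, h⟩)
        · exact h3 ((hd (r - c)).mpr ⟨x, hx, h⟩)
        · exact h4 ((ha (r + c)).mpr ⟨x, hx, h⟩)
      rw [Clash]
      rw [ih (p ++ [(r, c)]) _ _ _ _ ?_ ?_ ?_ ?_]
      · simp [hnone]
      all_goals
        intro v
        simp only [PySem.Set.mem_add, List.mem_append, List.mem_singleton]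
        constructor
        · rintro (h | h)
          · first
            | (obtain ⟨x, hx, hx1⟩ := (hr v).mp h; exact ⟨x, Or.inl hx, hx1⟩)
            | (obtain ⟨x, hx, hx1⟩ := (hc v).mp h; exact ⟨x, Or.inl hx, hx1⟩)
            | (obtain ⟨x, hx, hx1⟩ := (hd v).mp h; exact ⟨x, Or.inl hx, hx1⟩)
            | (obtain ⟨x, hx, hx1⟩ := (ha v).mp h; exact ⟨x, Or.inl hx, hx1⟩)
          · exact ⟨(r, c), Or.inr rfl, by simp [h]⟩
        · rintro ⟨x, hx | hx, hx1⟩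
          · first
            | exact Or.inl ((hr v).mpr ⟨x, hx, hx1⟩)
            | exact Or.inl ((hc v).mpr ⟨x, hx, hx1⟩)
            | exact Or.inl ((hd v).mpr ⟨x, hx, hx1⟩)
            | exact Or.inl ((ha v).mpr ⟨x, hx, hx1⟩)
          · subst hx; exact Or.inr (by simp [← hx1])

lemma clash_iff (l : List (Int × Int)) : ∀ p,
    Clash p l ↔ (∃ x ∈ p, ∃ y ∈ l, QAtt x y) ∨ ¬ l.Pairwise (fun a b => ¬ QAtt a b) := by
  induction l with
  | nil => intro p; simp [Clash]
  | cons y rest ih =>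
    intro p
    rw [Clash, ih]
    simp only [List.pairwise_cons, List.mem_cons, List.mem_append, List.mem_singleton,
      List.not_mem_nil, or_false]
    constructor
    · rintro (⟨x, hx, h⟩ | ⟨x, hx | rfl, z, hz, h⟩ | hpw)
      · exact Or.inl ⟨x, hx, y, Or.inl rfl, h⟩
      · exact Or.inl ⟨x, hx, z, Or.inr hz, h⟩
      · exact Or.inr (fun hconj => hconj.1 z hz h)
      · exact Or.inr (fun hconj => hpw hconj.2)
    · rintro (⟨x, hx, w, hw | hw, h⟩ | hneg)
      · exact Or.inl ⟨x, hx, by rwa [hw] at h⟩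
      · exact Or.inr (Or.inl ⟨x, Or.inl hx, w, hw, h⟩)
      · by_cases hy : ∃ z ∈ rest, QAtt y z
        · obtain ⟨z, hz, h⟩ := hy
          exact Or.inr (Or.inl ⟨y, Or.inr rfl, z, hz, h⟩)
        · push_neg at hy
          exact Or.inr (Or.inr (fun hpw => hneg ⟨hy, hpw⟩))

lemma scan_iff (l : List (Int × Int)) :
    scanQueens l PySem.Set.empty PySem.Set.empty PySem.Set.empty PySem.Set.empty = true ↔
      ¬ l.Pairwise (fun a b => ¬ QAtt a b) := by
  rw [scan_eq_clash l [] _ _ _ _ (by simp [PySem.Set.empty]) (by simp [PySem.Set.empty])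
      (by simp [PySem.Set.empty]) (by simp [PySem.Set.empty]), clash_iff]
  simp

lemma per_comb (l : List (Int × Int)) :
    (comb_fail l > 0) ↔ scanQueens l PySem.Set.empty PySem.Set.empty PySem.Set.empty PySem.Set.empty = true := by
  rw [scan_iff]
  exact comb_fail_pos_iff l

lemma fold_eq (combs : List (List (Int × Int))) : ∀ acc : Int,
    combs.foldl (fun failed i => if comb_fail i > 0 then failed + 1 else failed) acc =
    combs.foldl (fun failed comb =>
      if scanQueens comb PySem.Set.empty PySem.Set.empty PySem.Set.empty PySem.Set.empty
      then failed + 1 else failed) acc := by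
  induction combs with
  | nil => intro acc; rfl
  | cons c cs ih =>
    intro acc
    simp only [List.foldl_cons]
    rw [if_congr (per_comb c) rfl rfl]
    exact ih _

-- ===== VERDICT (by name: the statement is the Claim_ definition above) =====
theorem check_combs_spec : Claim_equal_check_combs := by
  intro combs k _
  unfold Spec_check_combs check_combs check_combs_alt
  exact fold_eq combs 0
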